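-- pv_equiv track=rewrite | github.com/rafaeltondin/shopify-chatbot | src/core/insufficient_context_notifier.py | clean_response_markers
-- ===== SOURCE A (Python) =====
-- MARKERS_TO_REMOVE = [
--     "[CONTEXTO_INSUFICIENTE]",
--     "[contexto_insuficiente]",
--     "[INSUFFICIENT_CONTEXT]",
--     "[insufficient_context]",
--     "::CONTEXTO_INSUFICIENTE::",
--     "::contexto_insuficiente::",
-- ]
--
-- def clean_response_markers(response_text: str) -> str:
--     """
--     Remove marcadores de contexto insuficiente da resposta final.
--
--     Args:
--         response_text: Texto da resposta do LLM
--
--     Returns: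
--         Texto limpo sem os marcadores
--     """
--     if not response_text:
--         return response_text
--
--     cleaned = response_text
--     for marker in MARKERS_TO_REMOVE:
--         cleaned = cleaned.replace(marker, "")
--
--     # Limpar espaços extras e quebras de linha no início
--     cleaned = cleaned.strip()
--
--     return cleaned
-- ===== SOURCE B (Python) =====
-- MARKERS_TO_REMOVE = [
--     "[CONTEXTO_INSUFICIENTE]",
--     "[contexto_insuficiente]",
--     "[INSUFFICIENT_CONTEXT]",
--     "[insufficient_context]",
--     "::CONTEXTO_INSUFICIENTE::",
--     "::contexto_insuficiente::",
-- ]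
--
--
-- def _drop_all(s, marker):
--     """Remove every occurrence of marker by find-and-splice, collecting the
--     kept pieces and joining them once at the end."""
--     parts = []
--     i = s.find(marker)
--     while i != -1:
--         parts.append(s[:i])
--         s = s[i + len(marker):]
--         i = s.find(marker)
--     parts.append(s)
--     return "".join(parts)
--
--
-- def _clean(s, markers):
--     if not markers:
--         return s
--     return _clean(_drop_all(s, markers[0]), markers[1:])
--
--
-- def clean_response_markers(response_text: str) -> str:
--     if not response_text:
--         return response_text
--     return _clean(response_text, MARKERS_TO_REMOVE).strip()
-- ===== Notes on version B (the rewrite author's own statement) =====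
-- stated objective: alternative
-- what changed: B replaces the loop of six built-in whole-string str.replace passes by a recursive fold over the marker list whose per-marker removal is a hand-rolled find-and-splice loop that collects the kept pieces and joins them once at the end.
import Mathlib
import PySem

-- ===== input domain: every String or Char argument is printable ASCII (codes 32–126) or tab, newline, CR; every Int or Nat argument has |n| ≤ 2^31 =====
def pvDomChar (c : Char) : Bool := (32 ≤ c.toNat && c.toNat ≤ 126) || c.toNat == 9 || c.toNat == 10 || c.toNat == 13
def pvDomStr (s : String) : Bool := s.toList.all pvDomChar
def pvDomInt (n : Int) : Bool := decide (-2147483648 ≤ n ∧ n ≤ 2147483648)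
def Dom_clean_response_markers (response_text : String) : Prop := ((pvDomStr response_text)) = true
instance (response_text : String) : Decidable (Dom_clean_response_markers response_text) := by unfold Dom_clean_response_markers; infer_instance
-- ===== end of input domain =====

-- B removes each marker by an explicit find-and-splice loop (pieces collected, joined once)
-- folded recursively over the marker list, instead of A's six built-in whole-string replace passes;
-- same cost, alternative structure. Return values proved equal on all of Dom.

-- ===== PORT A =====
def pvMarkersA : List String :=
  ["[CONTEXTO_INSUFICIENTE]", "[contexto_insuficiente]",
   "[INSUFFICIENT_CONTEXT]", "[insufficient_context]",
   "::CONTEXTO_INSUFICIENTE::", "::contexto_insuficiente::"]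

def clean_response_markers (response_text : String) : String :=
  if response_text == "" then response_text
  else
    let cleaned := pvMarkersA.foldl (fun cleaned marker => PySem.Str.replace cleaned marker "") response_text
    PySem.Str.strip cleaned

-- ===== PORT B =====
def pvMarkersB : List String :=
  ["[CONTEXTO_INSUFICIENTE]", "[contexto_insuficiente]",
   "[INSUFFICIENT_CONTEXT]", "[insufficient_context]",
   "::CONTEXTO_INSUFICIENTE::", "::contexto_insuficiente::"]

-- _drop_all's while loop, fuelled by the string length (each iteration consumes ≥ 1 char for the
-- nonempty markers B is called with); ''.join(parts) is ported exactly as concatenation (flatten).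
def pvDropAllGo (m : List Char) : Nat → List Char → List (List Char) → List Char
  | 0, s, parts => (parts ++ [s]).flatten
  | f+1, s, parts =>
    let i := PySem.Chars.find s m
    if i = -1 then (parts ++ [s]).flatten
    else pvDropAllGo m f (PySem.List.slice s (some (i + m.length)) none)
           (parts ++ [PySem.List.slice s none (some i)])

def pvDropAll (s m : List Char) : List Char := pvDropAllGo m s.length s []

-- _clean: recursion over the marker list
def pvClean : List Char → List (List Char) → List Char
  | s, [] => s
  | s, mk :: ms => pvClean (pvDropAll s mk) ms

def clean_response_markers_alt (response_text : String) : String :=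
  if response_text == "" then response_text
  else PySem.Str.strip (String.ofList (pvClean response_text.toList (pvMarkersB.map String.toList)))

-- ===== PRECONDITION & SPEC =====
def Spec_clean_response_markers (response_text : String) (out : String) : Prop := out = clean_response_markers_alt response_text
instance (response_text : String) (out : String) : Decidable (Spec_clean_response_markers response_text out) := by unfold Spec_clean_response_markers; infer_instance

-- ===== CLAIM (what is proved, stated in full; the proofs are below) =====
def Claim_equal_clean_response_markers : Prop := ∀ (response_text : String), Dom_clean_response_markers response_text → Spec_clean_response_markers response_text (clean_response_markers response_text)

-- ===== LEMMAS AND PROOFS =====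

theorem pv_find_nil {m : List Char} (hm : m ≠ []) : PySem.Chars.find [] m = -1 := by
  rw [PySem.Chars.find_eq_neg_one_iff]
  intro h
  exact hm (List.infix_nil.mp h)

theorem pv_find_cons_prefix {m : List Char} {c : Char} {t : List Char}
    (h : m <+: c :: t) : PySem.Chars.find (c :: t) m = 0 := by
  have h0 : 0 ≤ PySem.Chars.find (c :: t) m :=
    (PySem.Chars.find_nonneg_iff _ _).mpr h.isInfix
  obtain ⟨hpre, hmin⟩ := PySem.Chars.find_spec h0
  by_contra hne
  have : (PySem.Chars.find (c :: t) m).toNat ≠ 0 := by omega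
  exact hmin 0 (by omega) (by simpa using h)

theorem pv_find_cons_neg {m : List Char} {c : Char} {t : List Char}
    (h : ¬ m <+: c :: t) (ht : PySem.Chars.find t m = -1) :
    PySem.Chars.find (c :: t) m = -1 := by
  rw [PySem.Chars.find_eq_neg_one_iff]
  rw [PySem.Chars.find_eq_neg_one_iff] at ht
  intro hinf
  rw [← PySem.Chars.isIn_iff_infix, ← PySem.Chars.exists_prefix_drop_iff_isIn] at hinf
  obtain ⟨j, hj⟩ := hinf
  cases j with
  | zero => exact h (by simpa using hj)
  | succ j' =>
    exact ht ((PySem.Chars.isIn_iff_infix m t).mp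
      ((PySem.Chars.exists_prefix_drop_iff_isIn m t).mp ⟨j', by simpa using hj⟩))

theorem pv_find_cons_pos {m : List Char} {c : Char} {t : List Char}
    (h : ¬ m <+: c :: t) (ht : 0 ≤ PySem.Chars.find t m) :
    PySem.Chars.find (c :: t) m = PySem.Chars.find t m + 1 := by
  obtain ⟨hpre, hmin⟩ := PySem.Chars.find_spec ht
  have hinf : m <:+: c :: t := by
    rw [← PySem.Chars.isIn_iff_infix, ← PySem.Chars.exists_prefix_drop_iff_isIn]
    exact ⟨(PySem.Chars.find t m).toNat + 1, by simpa using hpre⟩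
  have h0 : 0 ≤ PySem.Chars.find (c :: t) m :=
    (PySem.Chars.find_nonneg_iff _ _).mpr hinf
  obtain ⟨hpre', hmin'⟩ := PySem.Chars.find_spec h0
  -- find (c::t) m ≤ find t m + 1
  have hle : (PySem.Chars.find (c :: t) m).toNat ≤ (PySem.Chars.find t m).toNat + 1 := by
    by_contra hgt
    exact hmin' ((PySem.Chars.find t m).toNat + 1) (by omega) (by simpa using hpre)
  -- find (c::t) m ≠ 0 and minimality on t
  have hne0 : (PySem.Chars.find (c :: t) m).toNat ≠ 0 := by
    intro h0'
    exact h (by simpa [h0'] using hpre')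
  have hge : (PySem.Chars.find t m).toNat + 1 ≤ (PySem.Chars.find (c :: t) m).toNat := by
    by_contra hlt
    obtain ⟨j, hj⟩ : ∃ j, (PySem.Chars.find (c :: t) m).toNat = j + 1 :=
      ⟨(PySem.Chars.find (c :: t) m).toNat - 1, by omega⟩
    exact hmin j (by omega) (by rw [hj] at hpre'; simpa using hpre')
  omega

-- accumulator lemma for the while loop
theorem pv_go_acc (m : List Char) (f : Nat) (s : List Char) (parts : List (List Char)) :
    pvDropAllGo m f s parts = parts.flatten ++ pvDropAllGo m f s [] := by
  induction f generalizing s parts with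
  | zero => simp [pvDropAllGo]
  | succ f ih =>
    rw [pvDropAllGo, pvDropAllGo]
    by_cases hi : PySem.Chars.find s m = -1
    · simp [hi]
    · simp only [hi, if_false]
      rw [ih _ (parts ++ _), ih _ ([] ++ _)]
      simp

theorem pv_go_of_neg {m : List Char} {s : List Char} (f : Nat)
    (h : PySem.Chars.find s m = -1) : pvDropAllGo m f s [] = s := by
  cases f with
  | zero => simp [pvDropAllGo]
  | succ f => simp [pvDropAllGo, h]

theorem pv_mlen {m : List Char} (hm : m ≠ []) : 1 ≤ m.length := by
  cases m with
  | nil => exact absurd rfl hm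
  | cons a b => simp

-- one loop step when the marker sits at the front
theorem pv_go_cons_prefix {m : List Char} {c : Char} {t : List Char} (f : Nat)
    (hpre : m <+: c :: t) :
    pvDropAllGo m (f + 1) (c :: t) [] = pvDropAllGo m f (List.drop m.length (c :: t)) [] := by
  have hfind := pv_find_cons_prefix hpre
  rw [pvDropAllGo]
  simp only [hfind]
  rw [if_neg (by omega)]
  rw [pv_go_acc]
  rw [PySem.List.slice_to _ (by omega), PySem.List.slice_from _ (by positivity)]
  norm_num

-- one loop step when the marker does not sit at the front: the head char is kept
theorem pv_go_cons_not {m : List Char} (hm : m ≠ []) {c : Char} {t : List Char} (f : Nat)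
    (h : ¬ m <+: c :: t) :
    pvDropAllGo m (f + 1) (c :: t) [] = c :: pvDropAllGo m (f + 1) t [] := by
  by_cases hi : PySem.Chars.find t m = -1
  · rw [pv_go_of_neg _ (pv_find_cons_neg h hi), pv_go_of_neg _ hi]
  · have hnn : 0 ≤ PySem.Chars.find t m := by
      have := PySem.Chars.neg_one_le_find t m; omega
    have hi' := pv_find_cons_pos h hnn
    rw [pvDropAllGo, pvDropAllGo]
    simp only [hi']
    rw [if_neg (by omega), if_neg hi]
    rw [pv_go_acc m f _ ([] ++ _), pv_go_acc m f _ ([] ++ _)]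
    rw [PySem.List.slice_to _ (by omega), PySem.List.slice_to _ (by omega),
        PySem.List.slice_from _ (by have := pv_mlen hm; omega),
        PySem.List.slice_from _ (by have := pv_mlen hm; omega)]
    have e1 : (PySem.Chars.find t m + 1).toNat = (PySem.Chars.find t m).toNat + 1 := by omega
    have e2 : (PySem.Chars.find t m + 1 + m.length).toNat
        = ((PySem.Chars.find t m + m.length).toNat) + 1 := by
      have := pv_mlen hm; omega
    rw [e1, e2]
    simp

-- fuel irrelevance (any fuel ≥ length gives the same result)
theorem pv_go_fuel_aux {m : List Char} (hm : m ≠ []) :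
    ∀ (n : Nat) (s : List Char) (f g : Nat), s.length ≤ n → s.length ≤ f → s.length ≤ g →
      pvDropAllGo m f s [] = pvDropAllGo m g s [] := by
  intro n
  induction n with
  | zero =>
    intro s f g hn _ _
    have : s = [] := List.eq_nil_of_length_eq_zero (by omega)
    subst this
    rw [pv_go_of_neg f (pv_find_nil hm), pv_go_of_neg g (pv_find_nil hm)]
  | succ n ih =>
    intro s f g hn hf hg
    cases s with
    | nil => rw [pv_go_of_neg f (pv_find_nil hm), pv_go_of_neg g (pv_find_nil hm)]
    | cons c t =>
      obtain ⟨f', rfl⟩ : ∃ f', f = f' + 1 :=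
        ⟨f - 1, by simp only [List.length_cons] at hf; omega⟩
      obtain ⟨g', rfl⟩ : ∃ g', g = g' + 1 :=
        ⟨g - 1, by simp only [List.length_cons] at hg; omega⟩
      by_cases hp : m <+: c :: t
      · rw [pv_go_cons_prefix f' hp, pv_go_cons_prefix g' hp]
        have := pv_mlen hm
        simp only [List.length_cons] at hn hf hg
        exact ih _ _ _ (by simp only [List.length_drop, List.length_cons]; omega)
          (by simp only [List.length_drop, List.length_cons]; omega)
          (by simp only [List.length_drop, List.length_cons]; omega)
      · rw [pv_go_cons_not hm f' hp, pv_go_cons_not hm g' hp]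
        simp only [List.length_cons] at hn hf hg
        exact congrArg (c :: ·) (ih t (f' + 1) (g' + 1) (by omega) (by omega) (by omega))

theorem pv_go_fuel {m : List Char} (hm : m ≠ []) (f g : Nat) (s : List Char)
    (hf : s.length ≤ f) (hg : s.length ≤ g) :
    pvDropAllGo m f s [] = pvDropAllGo m g s [] :=
  pv_go_fuel_aux hm s.length s f g le_rfl hf hg

-- the crux: the built-in replace scan equals B's find-and-splice loop
theorem pv_go_eq {m : List Char} (hm : m ≠ []) :
    ∀ (fuel : Nat) (l acc : List Char), l.length ≤ fuel →
      PySem.Chars.replace.go m [] fuel l acc = acc.reverse ++ pvDropAllGo m l.length l [] := by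
  intro fuel
  induction fuel with
  | zero =>
    intro l acc hl
    have : l = [] := List.eq_nil_of_length_eq_zero (by omega)
    subst this
    rw [PySem.Chars.replace.go]
    simp [pvDropAllGo]
  | succ fuel ih =>
    intro l acc hl
    cases l with
    | nil =>
      rw [PySem.Chars.replace.go]
      · simp [pvDropAllGo]
      · omega
    | cons c t =>
      by_cases hp : m.isPrefixOf (c :: t) = true
      · have hpre : m <+: c :: t := List.isPrefixOf_iff_prefix.mp hp
        rw [PySem.Chars.replace.go]
        simp only [hp, if_true, List.reverse_nil, List.nil_append]
        have hlen : (List.drop m.length (c :: t)).length ≤ fuel := by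
          have := pv_mlen hm
          simp only [List.length_drop, List.length_cons] at *
          omega
        rw [ih _ acc hlen]
        congr 1
        rw [show (c :: t).length = t.length + 1 from rfl, pv_go_cons_prefix t.length hpre]
        exact (pv_go_fuel hm _ _ _
          (by have := pv_mlen hm; simp only [List.length_drop, List.length_cons]; omega) le_rfl).symm
      · have hnp : ¬ m <+: c :: t := fun h => hp (List.isPrefixOf_iff_prefix.mpr h)
        rw [PySem.Chars.replace.go]
        simp only [hp, Bool.false_eq_true, if_false]
        rw [ih t (c :: acc) (by simp only [List.length_cons] at hl; omega)]
        rw [show (c :: t).length = t.length + 1 from rfl, pv_go_cons_not hm t.length hnp]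
        rw [pv_go_fuel hm (t.length + 1) t.length t (by omega) le_rfl]
        simp

theorem pv_replace_eq_dropAll (s m : List Char) (hm : m ≠ []) :
    PySem.Chars.replace s m [] = pvDropAll s m := by
  rw [PySem.Chars.replace]
  have : m.isEmpty = false := by simpa using hm
  simp only [this, Bool.false_eq_true, if_false]
  rw [pv_go_eq hm s.length s [] le_rfl]
  simp [pvDropAll]

theorem pv_fold_eq (S : String) (ms : List String) (h : ∀ m ∈ ms, m.toList ≠ []) :
    (ms.foldl (fun acc mk => PySem.Str.replace acc mk "") S).toList
      = pvClean S.toList (ms.map String.toList) := by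
  induction ms generalizing S with
  | nil => rfl
  | cons m ms ih =>
    simp only [List.foldl_cons, List.map_cons, pvClean]
    rw [ih _ (fun x hx => h x (List.mem_cons_of_mem m hx))]
    congr 1
    rw [PySem.Str.toList_replace]
    have : ("" : String).toList = [] := rfl
    rw [this, pv_replace_eq_dropAll _ _ (h m (List.mem_cons_self ..))]

-- ===== VERDICT (by name: the statement is the Claim_ definition above) =====
theorem clean_response_markers_spec : Claim_equal_clean_response_markers := by
  intro response_text _
  unfold Spec_clean_response_markers clean_response_markers clean_response_markers_alt
  by_cases he : response_text == ""
  · simp only [he, if_true]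
  · simp only [he, Bool.false_eq_true, if_false]
    have hne : ∀ m ∈ pvMarkersA, m.toList ≠ [] := by
      intro m hmem
      fin_cases hmem <;> simp
    have hlist := pv_fold_eq response_text pvMarkersA hne
    have hsame : pvMarkersB = pvMarkersA := rfl
    rw [hsame]
    refine congrArg PySem.Str.strip ?_
    conv_lhs => rw [← String.ofList_toList (s := pvMarkersA.foldl (fun cleaned marker => PySem.Str.replace cleaned marker "") response_text)]
    rw [hlist]
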